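-- pv_equiv track=rewrite | github.com/bekirdag/ades | src/ades/vector/graph_store.py | _normalize_predicates
-- ===== SOURCE A (Python) =====
-- from typing import Iterable, Literal
--
-- def _normalize_predicates(predicates: Iterable[str] | None) -> tuple[str, ...] | None:
--     if predicates is None:
--         return None
--     normalized = tuple(
--         sorted(
--             {
--                 str(predicate).strip().upper()
--                 for predicate in predicates
--                 if str(predicate).strip()
--             }
--         )
--     )
--     return normalized or None
-- ===== SOURCE B (Python) =====
-- def _merge(a, b):
--     out = []
--     i = j = 0
--     while i < len(a) and j < len(b):
--         if a[i] < b[j]: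
--             out.append(a[i]); i += 1
--         elif b[j] < a[i]:
--             out.append(b[j]); j += 1
--         else:
--             out.append(a[i]); i += 1; j += 1
--     out.extend(a[i:])
--     out.extend(b[j:])
--     return out
--
-- def _msort(xs):
--     if len(xs) <= 1:
--         return xs[:]
--     mid = len(xs) // 2
--     return _merge(_msort(xs[:mid]), _msort(xs[mid:]))
--
-- def _normalize_predicates(predicates):
--     if predicates is None:
--         return None
--     items = [str(p).strip().upper() for p in predicates if str(p).strip()]
--     return tuple(_msort(items)) or None
-- ===== Notes on version B (the rewrite author's own statement) =====
-- stated objective: alternative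
-- what changed: Replaces set-dedup plus library sort by a hand-written divide-and-conquer merge sort whose merge step drops duplicates when the two heads are equal, so no set and no sorted() are used at all.
import Mathlib
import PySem

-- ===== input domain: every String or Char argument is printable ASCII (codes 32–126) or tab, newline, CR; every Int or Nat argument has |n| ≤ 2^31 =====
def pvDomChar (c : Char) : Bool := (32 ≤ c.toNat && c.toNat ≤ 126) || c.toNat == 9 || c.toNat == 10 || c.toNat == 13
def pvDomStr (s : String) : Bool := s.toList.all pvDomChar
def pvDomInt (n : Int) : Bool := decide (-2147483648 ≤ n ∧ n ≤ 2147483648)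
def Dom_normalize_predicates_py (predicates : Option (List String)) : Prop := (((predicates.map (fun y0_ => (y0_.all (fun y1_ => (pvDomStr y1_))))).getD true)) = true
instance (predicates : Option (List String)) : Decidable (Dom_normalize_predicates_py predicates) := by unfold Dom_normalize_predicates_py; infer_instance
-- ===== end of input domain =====

-- B replaces A's set-dedup + library sort by a hand-written merge sort whose merge drops duplicates (alternative; same cost).


-- ===== PORT A =====
def normalize_predicates_py (predicates : Option (List String)) : Option (List String) :=
  match predicates with
  | none => none
  | some ps =>
    let s : PySem.Set String := ps.foldl (fun acc predicate =>
        if PySem.Str.strip predicate ≠ "" then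
          PySem.Set.add acc (PySem.Str.upper (PySem.Str.strip predicate))
        else acc) PySem.Set.empty
    let normalized := PySem.List.sorted s (fun x => x) false
    if normalized = [] then none else some normalized

-- ===== PORT B =====
-- Source B's _merge: the while loop over indices i, j as the obvious structural recursion
-- on the two remaining suffixes (fuel = total remaining length, a pure totality device;
-- it never runs out when called through pvMerge); the trailing out.extend(a[i:]) /
-- out.extend(b[j:]) are the two base cases.
def pvMergeF : Nat → List String → List String → List String
  | _, [], b => b
  | _, x :: a, [] => x :: a
  | f + 1, x :: a, y :: b =>
    if x < y then x :: pvMergeF f a (y :: b)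
    else if y < x then y :: pvMergeF f (x :: a) b
    else x :: pvMergeF f a b
  | 0, _ :: _, _ :: _ => []  -- fuel exhausted: unreachable from pvMerge

def pvMerge (a b : List String) : List String := pvMergeF (a.length + b.length) a b

-- Source B's _msort (fuel = list length, a pure totality device); xs[:mid] / xs[mid:]
-- are List.take / List.drop, exact here since 0 ≤ mid ≤ len(xs).
def pvMsortF : Nat → List String → List String
  | 0, xs => xs
  | f + 1, xs =>
    if xs.length ≤ 1 then xs
    else pvMerge (pvMsortF f (xs.take (xs.length / 2))) (pvMsortF f (xs.drop (xs.length / 2)))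

def pvMsort (xs : List String) : List String := pvMsortF xs.length xs

def normalize_predicates_py_alt (predicates : Option (List String)) : Option (List String) :=
  match predicates with
  | none => none
  | some ps =>
    let items := (ps.filter (fun p => PySem.Str.strip p != "")).map
        (fun p => PySem.Str.upper (PySem.Str.strip p))
    let r := pvMsort items
    if r = [] then none else some r

-- ===== PRECONDITION & SPEC =====
def Spec_normalize_predicates_py (predicates : Option (List String)) (out : Option (List String)) : Prop := out = normalize_predicates_py_alt predicates
instance (predicates : Option (List String)) (out : Option (List String)) : Decidable (Spec_normalize_predicates_py predicates out) := by unfold Spec_normalize_predicates_py; infer_instance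

-- ===== CLAIM (what is proved, stated in full; the proofs are below) =====
def Claim_equal_normalize_predicates_py : Prop := ∀ (predicates : Option (List String)), Dom_normalize_predicates_py predicates → Spec_normalize_predicates_py predicates (normalize_predicates_py predicates)

-- ===== LEMMAS AND PROOFS =====

-- the common stream of normalized, non-empty predicate strings
def pvL (ps : List String) : List String :=
  (ps.filter (fun x => PySem.Str.strip x != "")).map (fun x => PySem.Str.upper (PySem.Str.strip x))

lemma foldA_eq (ps : List String) (s : PySem.Set String) :
    ps.foldl (fun acc predicate =>
        if PySem.Str.strip predicate ≠ "" then
          PySem.Set.add acc (PySem.Str.upper (PySem.Str.strip predicate))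
        else acc) s = (pvL ps).foldl PySem.Set.add s := by
  induction ps generalizing s with
  | nil => rfl
  | cons x xs ih =>
    rw [List.foldl_cons]
    by_cases h : PySem.Str.strip x = ""
    · rw [if_neg (by simp [h]), ih]
      simp [pvL, h]
    · rw [if_pos h, ih]
      simp [pvL, h]

lemma mem_mergeF (f : Nat) : ∀ (xs ys : List String), xs.length + ys.length ≤ f →
    ∀ (a : String), (a ∈ pvMergeF f xs ys ↔ a ∈ xs ∨ a ∈ ys) := by
  induction f with
  | zero =>
    intro xs ys h a
    match xs, ys with
    | [], ys => simp [pvMergeF]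
    | x :: xs, [] => simp [pvMergeF]
    | x :: xs, y :: ys => simp at h
  | succ f ih =>
    intro xs ys h a
    match xs, ys with
    | [], ys => simp [pvMergeF]
    | x :: xs, [] => simp [pvMergeF]
    | x :: xs, y :: ys =>
      have hx : xs.length + (y :: ys).length ≤ f := by simp at h ⊢; omega
      have hy : (x :: xs).length + ys.length ≤ f := by simp at h ⊢; omega
      have hz : xs.length + ys.length ≤ f := by simp at h ⊢; omega
      by_cases h1 : x < y
      · simp only [pvMergeF, if_pos h1, List.mem_cons, ih _ _ hx]
        tauto
      · by_cases h2 : y < x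
        · simp only [pvMergeF, if_neg h1, if_pos h2, List.mem_cons, ih _ _ hy]
          tauto
        · have hxy : x = y := le_antisymm (le_of_not_gt h2) (le_of_not_gt h1)
          simp only [pvMergeF, if_neg h1, if_neg h2, List.mem_cons, ih _ _ hz]
          subst hxy; tauto

lemma mem_merge (a : String) (xs ys : List String) :
    a ∈ pvMerge xs ys ↔ a ∈ xs ∨ a ∈ ys :=
  mem_mergeF _ xs ys le_rfl a

lemma pairwise_mergeF (f : Nat) : ∀ (xs ys : List String), xs.length + ys.length ≤ f →
    xs.Pairwise (· < ·) → ys.Pairwise (· < ·) → (pvMergeF f xs ys).Pairwise (· < ·) := by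
  induction f with
  | zero =>
    intro xs ys h hx hy
    match xs, ys with
    | [], ys => simpa [pvMergeF] using hy
    | x :: xs, [] => simpa [pvMergeF] using hx
    | x :: xs, y :: ys => simp at h
  | succ f ih =>
    intro xs ys h hx hy
    match xs, ys with
    | [], ys => simpa [pvMergeF] using hy
    | x :: xs, [] => simpa [pvMergeF] using hx
    | x :: xs, y :: ys =>
      have hfx : xs.length + (y :: ys).length ≤ f := by simp at h ⊢; omega
      have hfy : (x :: xs).length + ys.length ≤ f := by simp at h ⊢; omega
      have hfz : xs.length + ys.length ≤ f := by simp at h ⊢; omega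
      rcases List.pairwise_cons.mp hx with ⟨hxa, hxa'⟩
      rcases List.pairwise_cons.mp hy with ⟨hyb, hyb'⟩
      by_cases h1 : x < y
      · rw [show pvMergeF (f + 1) (x :: xs) (y :: ys) = x :: pvMergeF f xs (y :: ys) from by
          simp [pvMergeF, h1]]
        refine List.pairwise_cons.mpr ⟨?_, ih _ _ hfx hxa' hy⟩
        intro z hz
        rcases (mem_mergeF f xs (y :: ys) hfx z).mp hz with hm | hm
        · exact hxa z hm
        · rcases List.mem_cons.mp hm with rfl | hm
          · exact h1
          · exact lt_trans h1 (hyb z hm)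
      · by_cases h2 : y < x
        · rw [show pvMergeF (f + 1) (x :: xs) (y :: ys) = y :: pvMergeF f (x :: xs) ys from by
            simp [pvMergeF, h1, h2]]
          refine List.pairwise_cons.mpr ⟨?_, ih _ _ hfy hx hyb'⟩
          intro z hz
          rcases (mem_mergeF f (x :: xs) ys hfy z).mp hz with hm | hm
          · rcases List.mem_cons.mp hm with rfl | hm
            · exact h2
            · exact lt_trans h2 (hxa z hm)
          · exact hyb z hm
        · have hxy : x = y := le_antisymm (le_of_not_gt h2) (le_of_not_gt h1)
          rw [show pvMergeF (f + 1) (x :: xs) (y :: ys) = x :: pvMergeF f xs ys from by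
            simp [pvMergeF, h1, h2]]
          refine List.pairwise_cons.mpr ⟨?_, ih _ _ hfz hxa' hyb'⟩
          intro z hz
          rcases (mem_mergeF f xs ys hfz z).mp hz with hm | hm
          · exact hxa z hm
          · exact hxy ▸ hyb z hm

lemma mem_msortF (f : Nat) : ∀ (xs : List String), xs.length ≤ f →
    ∀ (a : String), (a ∈ pvMsortF f xs ↔ a ∈ xs) := by
  induction f with
  | zero => intro xs h a; simp [pvMsortF]
  | succ f ih =>
    intro xs h a
    by_cases h1 : xs.length ≤ 1
    · simp [pvMsortF, h1]
    · have ht : (xs.take (xs.length / 2)).length ≤ f := by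
        simp only [List.length_take]; omega
      have hd : (xs.drop (xs.length / 2)).length ≤ f := by
        simp only [List.length_drop]; omega
      rw [show pvMsortF (f + 1) xs = pvMerge (pvMsortF f (xs.take (xs.length / 2)))
          (pvMsortF f (xs.drop (xs.length / 2))) from by simp [pvMsortF, h1]]
      rw [mem_merge, ih _ ht, ih _ hd, ← List.mem_append, List.take_append_drop]

lemma mem_msort (xs : List String) (a : String) : a ∈ pvMsort xs ↔ a ∈ xs :=
  mem_msortF _ xs le_rfl a

lemma msort_strictF (f : Nat) : ∀ (xs : List String), xs.length ≤ f →
    (pvMsortF f xs).Pairwise (· < ·) := by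
  induction f with
  | zero =>
    intro xs h
    match xs with
    | [] => simp [pvMsortF]
    | x :: t => simp at h
  | succ f ih =>
    intro xs h
    by_cases h1 : xs.length ≤ 1
    · match xs with
      | [] => simp [pvMsortF]
      | [x] => simp [pvMsortF]
      | x :: y :: t => simp at h1
    · have ht : (xs.take (xs.length / 2)).length ≤ f := by
        simp only [List.length_take]; omega
      have hd : (xs.drop (xs.length / 2)).length ≤ f := by
        simp only [List.length_drop]; omega
      rw [show pvMsortF (f + 1) xs = pvMerge (pvMsortF f (xs.take (xs.length / 2)))
          (pvMsortF f (xs.drop (xs.length / 2))) from by simp [pvMsortF, h1]]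
      exact pairwise_mergeF _ _ _ le_rfl (ih _ ht) (ih _ hd)

lemma msort_strict (xs : List String) : (pvMsort xs).Pairwise (· < ·) :=
  msort_strictF _ xs le_rfl

lemma key_main (l : List String) :
    PySem.List.sorted (PySem.Set.ofList l) (fun x => x) false = pvMsort l := by
  have hnd : (PySem.Set.ofList l : List String).Nodup := PySem.Set.nodup_ofList l
  have hpw : (pvMsort l).Pairwise (· < ·) := msort_strict l
  apply PySem.List.sorted_eq_of_perm_of_pairwise_lt
  · apply (List.perm_ext_iff_of_nodup ?_ ?_).mpr
    · intro a
      rw [mem_msort, PySem.Set.mem_ofList]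
    · exact hpw.imp (fun h => ne_of_lt h)
    · exact PySem.Set.nodup_ofList l
  · simpa using hpw

-- ===== VERDICT (by name: the statement is the Claim_ definition above) =====
theorem normalize_predicates_py_spec : Claim_equal_normalize_predicates_py := by
  intro predicates _
  unfold Spec_normalize_predicates_py
  cases predicates with
  | none => rfl
  | some ps =>
    simp only [normalize_predicates_py, normalize_predicates_py_alt, foldA_eq]
    rw [show (pvL ps).foldl PySem.Set.add PySem.Set.empty = PySem.Set.ofList (pvL ps) from
      (PySem.Set.ofList_eq_foldl (pvL ps)).symm]
    rw [key_main]
    rfl
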